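-- pv_equiv track=rewrite | github.com/MWJones96/ECM-1408---CA3 | alternade.py | alternade
-- ===== SOURCE A (Python) =====
-- def alternade(word, degree=2):
--     alternades = []
--     for first_letter in range(0, degree):
--         alt = ""
--         for letter in range(first_letter, len(word), degree):
--             alt += word[letter]
--
--         if alt != "":
--             alternades.append(alt)
--
--     return alternades
-- ===== SOURCE B (Python) =====
-- def alternade(word, degree=2):
--     if degree <= 0:
--         return []
--     buckets = [""] * degree
--     for i, ch in enumerate(word):
--         buckets[i % degree] += ch
--     return [b for b in buckets if b]
-- ===== Notes on version B (the rewrite author's own statement) =====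
-- stated objective: simpler
-- what changed: Replaced A's per-offset nested strided loops with a single linear pass that distributes each character into bucket i % degree and then drops empty buckets.
import Mathlib
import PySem

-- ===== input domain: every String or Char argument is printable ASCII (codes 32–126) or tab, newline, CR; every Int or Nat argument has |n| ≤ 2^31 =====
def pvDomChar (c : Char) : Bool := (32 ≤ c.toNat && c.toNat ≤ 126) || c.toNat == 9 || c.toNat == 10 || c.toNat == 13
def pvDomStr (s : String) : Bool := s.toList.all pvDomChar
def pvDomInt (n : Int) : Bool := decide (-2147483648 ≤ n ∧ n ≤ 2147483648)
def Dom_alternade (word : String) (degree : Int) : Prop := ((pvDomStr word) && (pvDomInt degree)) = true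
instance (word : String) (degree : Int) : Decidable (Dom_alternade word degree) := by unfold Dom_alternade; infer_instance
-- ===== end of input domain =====

-- B replaces A's nested strided loops by a single pass that distributes each character
-- into bucket i % degree and then drops the empty buckets (objective: simpler).

-- ===== PORT A =====
-- strings are carried as List Char (PySem convention); the `none` branch of pyGet? is
-- unreachable: every index produced by the inner range is < len(word).
def alternade (word : String) (degree : Int) : List String :=
  (PySem.List.pyRange 0 degree 1).foldl
    (fun alternades first_letter =>
      let alt : List Char :=
        (PySem.List.pyRange first_letter (PySem.Str.len word) degree).foldl
          (fun alt letter =>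
            match PySem.List.pyGet? word.toList letter with
            | some c => alt ++ [c]
            | none => alt)
          []
      if alt ≠ [] then alternades ++ [String.mk alt] else alternades)
    []

-- ===== PORT B =====
-- bucket strings carried as List Char; in `i % degree` we have i ≥ 0 and degree > 0,
-- so PySem.Int.mod is exact Python `%` here.
def alternade_alt (word : String) (degree : Int) : List String :=
  if degree ≤ 0 then []
  else
    ((((PySem.List.enumerate word.toList).foldl
        (fun bs p =>
          bs.set (PySem.Int.mod p.1 degree).toNat
            (bs.getD (PySem.Int.mod p.1 degree).toNat [] ++ [p.2]))
        (List.replicate degree.toNat [])).filter (· ≠ [])).map String.mk)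

-- ===== PRECONDITION & SPEC =====
def Spec_alternade (word : String) (degree : Int) (out : List String) : Prop := out = alternade_alt word degree
instance (word : String) (degree : Int) (out : List String) : Decidable (Spec_alternade word degree out) := by unfold Spec_alternade; infer_instance

-- ===== CLAIM (what is proved, stated in full; the proofs are below) =====
def Claim_equal_alternade : Prop := ∀ (word : String) (degree : Int), Dom_alternade word degree → Spec_alternade word degree (alternade word degree)

-- ===== LEMMAS AND PROOFS =====

-- chars of l at indices i, i+(s+1), i+2(s+1), … (stride s+1, so termination is on length - i)
def pick (l : List Char) (s : Nat) (i : Nat) : List Char :=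
  if h : i < l.length then l[i] :: pick l s (i + s + 1) else []
termination_by l.length - i

lemma pick_nil (s i : Nat) : pick ([] : List Char) s i = [] := by
  unfold pick; simp

lemma pick_oob (l : List Char) (s i : Nat) (h : l.length ≤ i) : pick l s i = [] := by
  unfold pick; simp [Nat.not_lt.mpr h]

lemma pick_append (t : List Char) (c : Char) (s : Nat) (i : Nat) :
    pick (t ++ [c]) s i =
      pick t s i ++ (if i ≤ t.length ∧ (t.length - i) % (s + 1) = 0 then [c] else []) := by
  suffices h : ∀ m i, t.length + 1 - i ≤ m → pick (t ++ [c]) s i =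
      pick t s i ++ (if i ≤ t.length ∧ (t.length - i) % (s + 1) = 0 then [c] else []) from
    h _ i le_rfl
  intro m
  induction m with
  | zero =>
    intro i hi
    have h1 : t.length < i := by omega
    rw [pick_oob _ _ _ (by simp; omega), pick_oob _ _ _ (by omega)]
    simp [Nat.not_le.mpr h1]
  | succ m ih =>
    intro i hi
    rcases lt_trichotomy i t.length with h | h | h
    · conv_lhs => rw [pick]
      have h1 : i < (t ++ [c]).length := by simp; omega
      simp only [h1, dif_pos]
      rw [List.getElem_append_left h, ih (i + s + 1) (by omega)]
      conv_rhs => rw [pick]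
      simp only [h, dif_pos, List.cons_append]
      congr 1
      by_cases h3 : i + s + 1 ≤ t.length
      · have hm : (t.length - i) % (s + 1) = (t.length - (i + s + 1)) % (s + 1) := by
          rw [show t.length - i = (t.length - (i + s + 1)) + (s + 1) by omega, Nat.add_mod_right]
        have hiff : (i + s + 1 ≤ t.length ∧ (t.length - (i + s + 1)) % (s + 1) = 0)
            ↔ (i ≤ t.length ∧ (t.length - i) % (s + 1) = 0) := by
          rw [hm]; constructor <;> rintro ⟨_, hb⟩ <;> exact ⟨by omega, hb⟩
        simp only [hiff]
      · have h4 : (t.length - i) % (s + 1) = t.length - i := Nat.mod_eq_of_lt (by omega)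
        have h6 : ¬ (i + s + 1 ≤ t.length ∧ (t.length - (i + s + 1)) % (s + 1) = 0) := by
          rintro ⟨ha, _⟩; omega
        have h7 : ¬ (i ≤ t.length ∧ (t.length - i) % (s + 1) = 0) := by
          rintro ⟨_, hb⟩; omega
        simp only [if_neg h6, if_neg h7, List.append_nil]
    · subst h
      conv_lhs => rw [pick]
      have h1 : t.length < (t ++ [c]).length := by simp
      simp only [h1, dif_pos]
      rw [List.getElem_append_right (le_refl t.length)]
      rw [pick_oob _ _ _ (by simp), pick_oob _ _ _ le_rfl]
      simp
    · rw [pick_oob _ _ _ (by simp; omega), pick_oob _ _ _ (by omega)]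
      have : ¬ (i ≤ t.length ∧ (t.length - i) % (s + 1) = 0) := by rintro ⟨ha, _⟩; omega
      simp [this]

-- (f ≤ n ∧ d ∣ n - f) ↔ f = n % d, for f < d
lemma cond_iff_mod (d n f : Nat) (hf : f < d) :
    (f ≤ n ∧ (n - f) % d = 0) ↔ f = n % d := by
  constructor
  · rintro ⟨hle, hmod⟩
    obtain ⟨k, hk⟩ := Nat.dvd_of_mod_eq_zero hmod
    have hn : n = f + d * k := by omega
    subst hn
    simp [Nat.add_mul_mod_self_left, Nat.mod_eq_of_lt hf]
  · rintro rfl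
    refine ⟨Nat.mod_le _ _, ?_⟩
    have h1 := Nat.div_add_mod n d
    have h2 : n - n % d = d * (n / d) := by omega
    simp [h2, Nat.mul_mod_right]

lemma set_map_range {α : Type} (g : Nat → α) (d j : Nat) (v : α) :
    ((List.range d).map g).set j v
      = (List.range d).map (fun f => if f = j then v else g f) := by
  apply List.ext_getElem
  · simp
  · intro k h1 h2
    simp only [List.getElem_set, List.getElem_map, List.getElem_range]
    by_cases hk : j = k <;> simp [hk, eq_comm]

-- a range(a, b, s) with 0 < s and a < b starts at a and continues from a + s
lemma pyRange_pos_cons (a b s : Int) (hs : 0 < s) (hab : a < b) :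
    PySem.List.pyRange a b s = a :: PySem.List.pyRange (a + s) b s := by
  rw [PySem.List.pyRange_of_pos _ _ hs, PySem.List.pyRange_of_pos _ _ hs]
  by_cases h2 : a + s < b
  · have hq : (b - (a + s) + s - 1) / s = (b - a - 1) / s := by ring_nf
    have hnn : 0 ≤ (b - a - 1) / s := Int.ediv_nonneg (by omega) hs.le
    have hm : (b - a + s - 1) / s = (b - a - 1) / s + 1 := by
      rw [show b - a + s - 1 = (b - a - 1) + 1 * s by ring, Int.add_mul_ediv_right _ _ hs.ne']
    have hcount : ((b - a + s - 1) / s).toNat = ((b - (a + s) + s - 1) / s).toNat + 1 := by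
      rw [hq, hm]; omega
    rw [if_pos hab, if_pos h2, hcount, List.range_succ_eq_map]
    simp only [List.map_cons, List.map_map]
    congr 1
    · push_cast; ring
    · apply List.map_congr_left
      intro k _
      simp only [Function.comp]
      push_cast
      ring
  · have hone : (b - a + s - 1) / s = 1 := by
      rw [← PySem.Int.floordiv_eq_ediv_of_pos hs, PySem.Int.floordiv_eq_iff_of_pos hs]
      constructor <;> omega
    rw [if_pos hab, if_neg h2, hone]
    simp

-- A's inner loop over range(first_letter, len(word), degree) computes pick
lemma innerA (l : List Char) (degree : Int) (hd : 0 < degree) :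
    ∀ (a : Int), 0 ≤ a → ∀ (init : List Char),
      (PySem.List.pyRange a (l.length : Int) degree).foldl
        (fun alt letter =>
          match PySem.List.pyGet? l letter with
          | some c => alt ++ [c]
          | none => alt)
        init
      = init ++ pick l (degree.toNat - 1) a.toNat := by
  suffices h : ∀ (m : Nat) (a : Int), 0 ≤ a → l.length + 1 - a.toNat ≤ m → ∀ init,
      (PySem.List.pyRange a (l.length : Int) degree).foldl
        (fun alt letter =>
          match PySem.List.pyGet? l letter with
          | some c => alt ++ [c]
          | none => alt)
        init
      = init ++ pick l (degree.toNat - 1) a.toNat by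
    intro a ha init; exact h (l.length + 1 - a.toNat) a ha le_rfl init
  intro m
  induction m with
  | zero =>
    intro a ha hm init
    rw [PySem.List.pyRange_of_pos _ _ hd, if_neg (by omega), pick_oob _ _ _ (by omega)]
    simp
  | succ m ih =>
    intro a ha hm init
    by_cases hlt : a < (l.length : Int)
    · rw [pyRange_pos_cons _ _ _ hd hlt, List.foldl_cons]
      have hat : a = ((a.toNat : Nat) : Int) := (Int.toNat_of_nonneg ha).symm
      have hget : PySem.List.pyGet? l a = l[a.toNat]? := by
        rw [hat]; exact PySem.List.pyGet?_natCast l a.toNat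
      have hlt' : a.toNat < l.length := by omega
      rw [hget]
      simp only [List.getElem?_eq_getElem hlt']
      rw [ih (a + degree) (by omega) (by omega)]
      conv_rhs => rw [pick]
      simp only [hlt', dif_pos]
      have hst : a.toNat + (degree.toNat - 1) + 1 = (a + degree).toNat := by omega
      rw [hst]
      simp
    · rw [PySem.List.pyRange_of_pos _ _ hd, if_neg (by omega), pick_oob _ _ _ (by omega)]
      simp

-- B's single pass builds exactly the list of picks, one bucket per offset
lemma bucketsB (degree : Int) (hd : 0 < degree) (l : List Char) :
    (PySem.List.enumerate l).foldl
        (fun bs p =>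
          bs.set (PySem.Int.mod p.1 degree).toNat
            (bs.getD (PySem.Int.mod p.1 degree).toNat [] ++ [p.2]))
        (List.replicate degree.toNat [])
      = (List.range degree.toNat).map (fun f => pick l (degree.toNat - 1) f) := by
  obtain ⟨d, rfl⟩ : ∃ d : Nat, degree = (d : Int) :=
    ⟨degree.toNat, (Int.toNat_of_nonneg hd.le).symm⟩
  have hdpos : 0 < d := by omega
  simp only [Int.toNat_natCast]
  induction l using List.reverseRecOn with
  | nil =>
    simp [PySem.List.enumerate_nil, pick_nil, List.map_const']
  | append_singleton t c ih =>
    rw [PySem.List.enumerate_append, List.foldl_append, ih]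
    simp only [PySem.List.enumerate_cons, PySem.List.enumerate_nil, List.foldl_cons,
      List.foldl_nil]
    have hmod : (PySem.Int.mod (0 + (t.length : Int)) (d : Int)).toNat = t.length % d := by
      rw [zero_add, PySem.Int.mod_natCast]; omega
    rw [hmod]
    have hj : t.length % d < d := Nat.mod_lt _ hdpos
    rw [PySem.List.getD_map_range _ _ _ _ hj, set_map_range]
    apply List.map_congr_left
    intro f hf
    have hfd : f < d := List.mem_range.mp hf
    have hs1 : d - 1 + 1 = d := by omega
    rw [pick_append, hs1]
    by_cases hc : f = t.length % d
    · subst hc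
      rw [if_pos rfl, if_pos ((cond_iff_mod _ _ _ hfd).mpr rfl)]
    · rw [if_neg hc, if_neg (fun h => hc ((cond_iff_mod _ _ _ hfd).mp h))]
      simp

-- ===== VERDICT (by name: the statement is the Claim_ definition above) =====
theorem alternade_spec : Claim_equal_alternade := by
  intro word degree _
  unfold Spec_alternade alternade alternade_alt
  by_cases hle : degree ≤ 0
  · rw [if_pos hle, PySem.List.pyRange_one_eq_nil hle]
    simp
  · have hd : 0 < degree := by omega
    rw [if_neg hle]
    obtain ⟨d, rfl⟩ : ∃ d : Nat, degree = (d : Int) :=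
      ⟨degree.toNat, (Int.toNat_of_nonneg hd.le).symm⟩
    rw [bucketsB _ hd]
    simp only [Int.toNat_natCast]
    rw [PySem.List.pyRange_zero_natCast, List.foldl_map]
    have hfun : (fun (alternades : List String) (k : Nat) =>
        (fun alternades first_letter =>
          let alt : List Char :=
            (PySem.List.pyRange first_letter (PySem.Str.len word) ((d : Nat) : Int)).foldl
              (fun alt letter =>
                match PySem.List.pyGet? word.toList letter with
                | some c => alt ++ [c]
                | none => alt)
              []
          if alt ≠ [] then alternades ++ [String.mk alt] else alternades) alternades ((k : Nat) : Int))
        = (fun acc k =>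
            if (fun k => decide (pick word.toList (d - 1) k ≠ [])) k = true then
              acc ++ [(fun k => String.mk (pick word.toList (d - 1) k)) k]
            else acc) := by
      funext acc k
      have hinner := innerA word.toList ((d : Nat) : Int) hd ((k : Nat) : Int)
        (Int.natCast_nonneg k) []
      simp only [Int.toNat_natCast] at hinner
      rw [PySem.Str.len_eq]
      simp only [hinner, List.nil_append]
      by_cases h : pick word.toList (d - 1) k = [] <;> simp [h]
    rw [hfun, PySem.List.foldl_append_if, List.filter_map, List.map_map]
    rfl
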